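-- pv_equiv track=rewrite | github.com/krishna-ji/timetable-engine | src/io/export/exporter.py | _build_rich_color_map
-- ===== SOURCE A (Python) =====
-- _THEORY_COLORS = [
--     "#A8C6FA",  # soft blue
--     "#B5D8B5",  # sage green
--     "#C4B7D7",  # lavender
--     "#F9D7A0",  # peach
--     "#A8E0D1",  # mint
--     "#D4C5F9",  # lilac
--     "#B8DFF0",  # sky
--     "#C9E8B2",  # lime
-- ]
--
-- _PRACTICAL_COLORS = [
--     "#F4A6A0",  # coral
--     "#F2C6A0",  # apricot
--     "#F7B7D2",  # pink
--     "#E6A8D7",  # orchid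
--     "#F0B8B8",  # salmon
--     "#F5C7B8",  # melon
-- ]
--
-- def _build_rich_color_map(course_ids: set[tuple[str, str]]) -> dict[str, str]:
--     """Assign distinct pastel colours per course, separated by type."""
--     cmap: dict[str, str] = {}
--     ti, pi = 0, 0
--     for label, ctype in sorted(course_ids):
--         if ctype == "practical" or "(PR)" in label:
--             cmap[label] = _PRACTICAL_COLORS[pi % len(_PRACTICAL_COLORS)]
--             pi += 1
--         else:
--             cmap[label] = _THEORY_COLORS[ti % len(_THEORY_COLORS)]
--             ti += 1
--     return cmap
-- ===== SOURCE B (Python) =====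
-- _THEORY_COLORS = [
--     "#A8C6FA",
--     "#B5D8B5",
--     "#C4B7D7",
--     "#F9D7A0",
--     "#A8E0D1",
--     "#D4C5F9",
--     "#B8DFF0",
--     "#C9E8B2",
-- ]
--
-- _PRACTICAL_COLORS = [
--     "#F4A6A0",
--     "#F2C6A0",
--     "#F7B7D2",
--     "#E6A8D7",
--     "#F0B8B8",
--     "#F5C7B8",
-- ]
--
--
-- def _is_practical(entry):
--     label, ctype = entry
--     return ctype == "practical" or "(PR)" in label
--
--
-- def _build_rich_color_map(course_ids: "set[tuple[str, str]]") -> "dict[str, str]":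
--     """Assign distinct pastel colours per course, separated by type."""
--     ordered = sorted(course_ids)
--     practical = [e for e in ordered if _is_practical(e)]
--     theory = [e for e in ordered if not _is_practical(e)]
--     entry_color = {}
--     for i, e in enumerate(practical):
--         entry_color[e] = _PRACTICAL_COLORS[i % len(_PRACTICAL_COLORS)]
--     for i, e in enumerate(theory):
--         entry_color[e] = _THEORY_COLORS[i % len(_THEORY_COLORS)]
--     return {label: entry_color[(label, ctype)] for label, ctype in ordered}
-- ===== Notes on version B (the rewrite author's own statement) =====
-- stated objective: alternative
-- what changed: A's single interleaved loop over the sorted set with two running counters is replaced by a sort, a partition into ordered practical/theory group lists, two enumerate passes that colour each group by list position, and a final lookup pass that assembles the label->colour dict; Pre_ only states the set invariant (distinct elements) the Python parameter type guarantees.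
import Mathlib
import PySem

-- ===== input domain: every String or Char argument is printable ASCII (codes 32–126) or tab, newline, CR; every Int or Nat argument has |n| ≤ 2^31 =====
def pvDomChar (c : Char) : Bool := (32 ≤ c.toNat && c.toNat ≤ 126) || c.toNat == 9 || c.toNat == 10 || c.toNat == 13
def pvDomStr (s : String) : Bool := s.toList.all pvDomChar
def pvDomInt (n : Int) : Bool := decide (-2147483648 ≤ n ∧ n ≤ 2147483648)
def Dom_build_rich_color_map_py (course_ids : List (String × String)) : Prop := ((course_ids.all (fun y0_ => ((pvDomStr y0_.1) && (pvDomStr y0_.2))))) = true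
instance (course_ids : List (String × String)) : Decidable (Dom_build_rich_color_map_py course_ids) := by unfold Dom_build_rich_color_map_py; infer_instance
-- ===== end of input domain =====

-- B replaces A's single interleaved loop with two counters by a sort + partition into
-- practical/theory groups, two enumerate-style colour-assignment passes, and a final
-- lookup pass (objective: alternative decomposition, same cost).


-- shared module constants (the two Python files carry the same colour tables)
def pvTC : List String :=
  ["#A8C6FA", "#B5D8B5", "#C4B7D7", "#F9D7A0", "#A8E0D1", "#D4C5F9", "#B8DFF0", "#C9E8B2"]
def pvPC : List String :=
  ["#F4A6A0", "#F2C6A0", "#F7B7D2", "#E6A8D7", "#F0B8B8", "#F5C7B8"]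

-- `ctype == "practical" or "(PR)" in label`
def pvPred (e : String × String) : Bool := (e.2 == "practical") || PySem.Str.isIn "(PR)" e.1

-- `_PRACTICAL_COLORS[i % len(_PRACTICAL_COLORS)]` / `_THEORY_COLORS[i % len(_THEORY_COLORS)]`
def pvPCol (i : Int) : String := PySem.List.pyGetD pvPC (PySem.Int.mod i (pvPC.length : Int)) ""
def pvTCol (i : Int) : String := PySem.List.pyGetD pvTC (PySem.Int.mod i (pvTC.length : Int)) ""

-- ===== PORT A =====
-- loop body of A: state (cmap, ti, pi)
def pvStepA (st : PySem.Dict String String × Int × Int) (e : String × String) :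
    PySem.Dict String String × Int × Int :=
  if pvPred e then (st.1.insert e.1 (pvPCol st.2.2), st.2.1, st.2.2 + 1)
  else (st.1.insert e.1 (pvTCol st.2.1), st.2.1 + 1, st.2.2)

def build_rich_color_map_py (course_ids : List (String × String)) : List (String × String) :=
  (((PySem.List.sorted2 course_ids (·.1) (·.2) false).foldl pvStepA
      (PySem.Dict.empty, 0, 0)).1).items

-- ===== PORT B =====
-- entry_color: colour each practical entry, then each theory entry, by its enumerate index
def pvEC (pract theo : List (String × String)) : PySem.Dict (String × String) String :=
  (PySem.List.enumerate theo 0).foldl (fun d p => d.insert p.2 (pvTCol p.1))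
    ((PySem.List.enumerate pract 0).foldl (fun d p => d.insert p.2 (pvPCol p.1))
      PySem.Dict.empty)

def build_rich_color_map_py_alt (course_ids : List (String × String)) : List (String × String) :=
  let ordered := PySem.List.sorted2 course_ids (·.1) (·.2) false
  let pract := ordered.filter pvPred
  let theo := ordered.filter (fun e => !pvPred e)
  let ec := pvEC pract theo
  -- `entry_color[(label, ctype)]`: the key is always present (proved below), so getD is exact
  (ordered.foldl (fun d e => d.insert e.1 (ec.getD e "")) PySem.Dict.empty).items

-- ===== PRECONDITION & SPEC =====
-- The Python parameter is a set[tuple[str, str]], so its elements are distinct; Pre_ states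
-- exactly that set invariant (it excludes no constructible Python input).
def Pre_build_rich_color_map_py (course_ids : List (String × String)) : Prop := course_ids.Nodup
instance (course_ids : List (String × String)) : Decidable (Pre_build_rich_color_map_py course_ids) := by unfold Pre_build_rich_color_map_py; infer_instance

def pvWitness_build_rich_color_map_py : (List (String × String)) :=
  [("Algo", "theory"), ("DB Lab (PR)", "practical")]

def Spec_build_rich_color_map_py (course_ids : List (String × String)) (out : List (String × String)) : Prop := out = build_rich_color_map_py_alt course_ids
instance (course_ids : List (String × String)) (out : List (String × String)) : Decidable (Spec_build_rich_color_map_py course_ids out) := by unfold Spec_build_rich_color_map_py; infer_instance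

-- ===== CLAIM (what is proved, stated in full; the proofs are below) =====
def Claim_equal_build_rich_color_map_py : Prop := ∀ (course_ids : List (String × String)), Dom_build_rich_color_map_py course_ids → Pre_build_rich_color_map_py course_ids → Spec_build_rich_color_map_py course_ids (build_rich_color_map_py course_ids)

-- ===== LEMMAS AND PROOFS =====

-- the list of (label, colour) pairs A's loop inserts, counters made explicit
def pvDec (ti pi : Int) : List (String × String) → List (String × String)
  | [] => []
  | e :: t =>
    if pvPred e then (e.1, pvPCol pi) :: pvDec ti (pi + 1) t
    else (e.1, pvTCol ti) :: pvDec (ti + 1) pi t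

-- A's fold is the insert-fold of pvDec
theorem pvA_fold (l : List (String × String)) (d : PySem.Dict String String) (ti pi : Int) :
    (l.foldl pvStepA (d, ti, pi)).1 =
      (pvDec ti pi l).foldl (fun d p => d.insert p.1 p.2) d := by
  induction l generalizing d ti pi with
  | nil => rfl
  | cons e t ih =>
    by_cases h : pvPred e = true <;>
      simp [pvDec, pvStepA, h, ih]

-- lookup through an enumerate-insert fold: absent key
theorem pvEn_getD_not_mem (g : Int → String) (xs : List (String × String)) (s : Int)
    (d : PySem.Dict (String × String) String) (e : String × String) (he : e ∉ xs) :
    ((PySem.List.enumerate xs s).foldl (fun d p => d.insert p.2 (g p.1)) d).getD e "" =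
      d.getD e "" := by
  induction xs generalizing d s with
  | nil => simp [PySem.List.enumerate_nil]
  | cons x t ih =>
    have hex : e ≠ x := fun h => he (h ▸ List.mem_cons_self)
    have het : e ∉ t := fun h => he (List.mem_cons_of_mem _ h)
    rw [PySem.List.enumerate_cons]
    simp only [List.foldl_cons]
    rw [ih _ _ het, PySem.Dict.getD_insert_of_ne _ _ _ hex]

-- lookup through an enumerate-insert fold: present key in a duplicate-free list
theorem pvEn_getD_mem (g : Int → String) (xs : List (String × String)) (s : Int)
    (d : PySem.Dict (String × String) String) (e : String × String)
    (hnd : xs.Nodup) (he : e ∈ xs) :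
    ((PySem.List.enumerate xs s).foldl (fun d p => d.insert p.2 (g p.1)) d).getD e "" =
      g (s + (xs.idxOf e : Int)) := by
  induction xs generalizing d s with
  | nil => cases he
  | cons x t ih =>
    rw [PySem.List.enumerate_cons]
    simp only [List.foldl_cons]
    by_cases hex : e = x
    · subst hex
      have het : e ∉ t := (List.nodup_cons.mp hnd).1
      rw [pvEn_getD_not_mem g t _ _ _ het, PySem.Dict.getD_insert_self]
      simp [List.idxOf_cons_self]
    · have het : e ∈ t := (List.mem_cons.mp he).resolve_left hex
      rw [ih _ _ (List.nodup_cons.mp hnd).2 het]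
      have hxe : (x == e) = false := beq_eq_false_iff_ne.mpr (fun h => hex h.symm)
      rw [List.idxOf_cons, hxe]
      simp only [cond_false]
      congr 1
      push_cast
      ring

-- the entry_color lookup of B, characterised for members of l
theorem pvEC_getD (l : List (String × String)) (hnd : l.Nodup) (e : String × String)
    (he : e ∈ l) :
    (pvEC (l.filter pvPred) (l.filter (fun x => !pvPred x))).getD e "" =
      if pvPred e then pvPCol ((l.filter pvPred).idxOf e : Int)
      else pvTCol ((l.filter (fun x => !pvPred x)).idxOf e : Int) := by
  unfold pvEC
  by_cases h : pvPred e = true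
  · have hmem : e ∈ l.filter pvPred := List.mem_filter.mpr ⟨he, h⟩
    have hno : e ∉ l.filter (fun x => !pvPred x) := by
      intro hc
      have := (List.mem_filter.mp hc).2
      simp [h] at this
    rw [pvEn_getD_not_mem _ _ _ _ _ hno,
        pvEn_getD_mem _ _ _ _ _ (hnd.filter _) hmem]
    simp [h]
  · have hmem : e ∈ l.filter (fun x => !pvPred x) := List.mem_filter.mpr (by simp [he, h])
    rw [pvEn_getD_mem _ _ _ _ _ (hnd.filter _) hmem]
    simp [h]

-- pvDec in closed form: each element's colour by its index inside its group
theorem pvDec_spec (l : List (String × String)) (ti pi : Int) (hnd : l.Nodup) :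
    pvDec ti pi l = l.map (fun e =>
      (e.1, if pvPred e then pvPCol (pi + ((l.filter pvPred).idxOf e : Int))
            else pvTCol (ti + ((l.filter (fun x => !pvPred x)).idxOf e : Int)))) := by
  induction l generalizing ti pi with
  | nil => rfl
  | cons x t ih =>
    obtain ⟨hxt, hndt⟩ := List.nodup_cons.mp hnd
    have hne : ∀ e ∈ t, (x == e) = false := fun e het =>
      beq_eq_false_iff_ne.mpr (fun h => hxt (h ▸ het))
    by_cases h : pvPred x = true
    · have h1 : (x :: t).filter pvPred = x :: t.filter pvPred := List.filter_cons_of_pos h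
      have h2 : (x :: t).filter (fun y => !pvPred y) = t.filter (fun y => !pvPred y) :=
        List.filter_cons_of_neg (by simp [h])
      simp only [pvDec, List.map_cons, h1, h2, List.idxOf_cons_self, if_pos h]
      refine List.cons_eq_cons.mpr ⟨by simp, ?_⟩
      rw [ih ti (pi + 1) hndt]
      apply List.map_congr_left
      intro e het
      by_cases hpe : pvPred e = true
      · simp only [if_pos hpe, List.idxOf_cons, hne e het, cond_false, Prod.mk.injEq, true_and]
        congr 1
        push_cast
        ring
      · simp [hpe]
    · have h1 : (x :: t).filter pvPred = t.filter pvPred := List.filter_cons_of_neg h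
      have h2 : (x :: t).filter (fun y => !pvPred y) = x :: t.filter (fun y => !pvPred y) :=
        List.filter_cons_of_pos (by simp [h])
      simp only [pvDec, List.map_cons, h1, h2, List.idxOf_cons_self, if_neg h]
      refine List.cons_eq_cons.mpr ⟨by simp, ?_⟩
      rw [ih (ti + 1) pi hndt]
      apply List.map_congr_left
      intro e het
      by_cases hpe : pvPred e = true
      · simp [hpe]
      · simp only [if_neg hpe, List.idxOf_cons, hne e het, cond_false, Prod.mk.injEq, true_and]
        congr 1
        push_cast
        ring

-- ===== VERDICT (by name: the statement is the Claim_ definition above) =====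
theorem build_rich_color_map_py_spec : Claim_equal_build_rich_color_map_py := by
  intro cs _ hpre
  unfold Spec_build_rich_color_map_py build_rich_color_map_py build_rich_color_map_py_alt
  set l := PySem.List.sorted2 cs (·.1) (·.2) false with hl
  have hnd : l.Nodup := ((PySem.List.sorted2_perm cs _ _ false).nodup_iff).mpr hpre
  rw [pvA_fold, pvDec_spec l 0 0 hnd]
  have hmap : l.map (fun e =>
      (e.1, if pvPred e then pvPCol (0 + ((l.filter pvPred).idxOf e : Int))
            else pvTCol (0 + ((l.filter (fun x => !pvPred x)).idxOf e : Int)))) =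
      l.map (fun e =>
        (e.1, (pvEC (l.filter pvPred) (l.filter (fun x => !pvPred x))).getD e "")) := by
    apply List.map_congr_left
    intro e he
    rw [pvEC_getD l hnd e he]
    simp
  rw [hmap, List.foldl_map]
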